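-- pv_equiv track=rewrite | github.com/D3struf/Killer-Sudoku | others/hill-climbing-algo.py | checkColumnDuplicates
-- ===== SOURCE A (Python) =====
-- def checkColumnDuplicates(matrix):
--     duplicates_count = 0
--
--     for col in range(len(matrix[0])):
--         unique_numbers = set()
--         duplicate_numbers = set()
--
--         for row in matrix:
--             num = row[col]
--             if num in unique_numbers:
--                 duplicate_numbers.add(num)
--             else:
--                 unique_numbers.add(num)
--
--         duplicates_count += len(duplicate_numbers)
--
--     return duplicates_count
-- ===== SOURCE B (Python) =====
-- def checkColumnDuplicates(matrix):
--     total = 0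
--     for col in range(len(matrix[0])):
--         column = sorted(row[col] for row in matrix)
--         total += len({a for a, b in zip(column, column[1:]) if a == b})
--     return total
-- ===== Notes on version B (the rewrite author's own statement) =====
-- stated objective: alternative
-- what changed: Replaces A's per-column hash-set seen/duplicate pass with a sort-then-scan algorithm: each column is sorted, and duplicated values are detected as adjacent equal pairs in the sorted column (deduplicated into a set).
import Mathlib
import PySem

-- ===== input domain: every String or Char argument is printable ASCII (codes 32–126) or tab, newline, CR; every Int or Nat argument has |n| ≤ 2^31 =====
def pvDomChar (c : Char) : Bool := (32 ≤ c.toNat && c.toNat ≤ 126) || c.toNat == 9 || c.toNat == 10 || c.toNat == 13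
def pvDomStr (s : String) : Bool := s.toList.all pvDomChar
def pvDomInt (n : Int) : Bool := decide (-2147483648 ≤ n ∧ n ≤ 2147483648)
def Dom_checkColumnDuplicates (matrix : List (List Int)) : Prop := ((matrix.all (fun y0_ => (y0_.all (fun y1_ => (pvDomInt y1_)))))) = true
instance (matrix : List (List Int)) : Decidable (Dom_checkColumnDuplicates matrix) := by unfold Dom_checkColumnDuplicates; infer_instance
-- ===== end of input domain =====

-- B replaces A's per-column hash-set seen/duplicate pass with a sort-then-scan
-- algorithm: sort each column, duplicates are the distinct adjacent-equal values.

-- ===== PORT A =====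
def checkColumnDuplicates (matrix : List (List Int)) : Int :=
  (PySem.List.pyRange 0 ((PySem.List.pyGetD matrix 0 []).length : Int) 1).foldl
    (fun duplicates_count col =>
      let p := matrix.foldl
        (fun (st : PySem.Set Int × PySem.Set Int) row =>
          let num := PySem.List.pyGetD row col 0
          if PySem.Set.contains st.1 num then (st.1, PySem.Set.add st.2 num)
          else (PySem.Set.add st.1 num, st.2))
        (PySem.Set.empty, PySem.Set.empty)
      duplicates_count + (PySem.Set.len p.2 : Int))
    0

-- ===== PORT B =====
def checkColumnDuplicates_alt (matrix : List (List Int)) : Int :=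
  (PySem.List.pyRange 0 ((PySem.List.pyGetD matrix 0 []).length : Int) 1).foldl
    (fun total col =>
      let column := PySem.List.sorted (matrix.map (fun row => PySem.List.pyGetD row col 0)) (fun x => x) false
      let dups := (column.zip (PySem.List.slice column (some 1) none)).foldl
        (fun (s : PySem.Set Int) p => if p.1 == p.2 then PySem.Set.add s p.1 else s)
        PySem.Set.empty
      total + (PySem.Set.len dups : Int))
    0

-- ===== PRECONDITION & SPEC =====
-- Pre_ excludes exactly the inputs where the Python raises IndexError: the empty
-- matrix (matrix[0]) and matrices with a row shorter than the first row (row[col]).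
def Pre_checkColumnDuplicates (matrix : List (List Int)) : Prop :=
  matrix ≠ [] ∧ ∀ row ∈ matrix, matrix.headI.length ≤ row.length
instance (matrix : List (List Int)) : Decidable (Pre_checkColumnDuplicates matrix) := by
  unfold Pre_checkColumnDuplicates; infer_instance

def pvWitness_checkColumnDuplicates : List (List Int) := [[1, 2], [1, 3]]

def Spec_checkColumnDuplicates (matrix : List (List Int)) (out : Int) : Prop := out = checkColumnDuplicates_alt matrix
instance (matrix : List (List Int)) (out : Int) : Decidable (Spec_checkColumnDuplicates matrix out) := by unfold Spec_checkColumnDuplicates; infer_instance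

-- ===== CLAIM (what is proved, stated in full; the proofs are below) =====
def Claim_equal_checkColumnDuplicates : Prop := ∀ (matrix : List (List Int)), Dom_checkColumnDuplicates matrix → Pre_checkColumnDuplicates matrix → Spec_checkColumnDuplicates matrix (checkColumnDuplicates matrix)

-- ===== LEMMAS AND PROOFS =====

-- A's inner loop over one column's values
def pvStepA (st : PySem.Set Int × PySem.Set Int) (x : Int) : PySem.Set Int × PySem.Set Int :=
  if PySem.Set.contains st.1 x then (st.1, PySem.Set.add st.2 x)
  else (PySem.Set.add st.1 x, st.2)

lemma foldA_inv (xs : List Int) : ∀ (u d : List Int), u.Nodup → d.Nodup → (∀ x ∈ d, x ∈ u) →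
    (xs.foldl pvStepA (u, d)).2.Nodup ∧
    (∀ x, x ∈ (xs.foldl pvStepA (u, d)).2 ↔ x ∈ d ∨ (x ∈ u ∧ x ∈ xs) ∨ 2 ≤ xs.count x) := by
  induction xs with
  | nil => intro u d hu hd hsub; simp [hd]
  | cons y ys ih =>
    intro u d hu hd hsub
    by_cases hy : y ∈ u
    · have hstep : pvStepA (u, d) y = (u, PySem.Set.add d y) := by
        simp only [pvStepA, (PySem.Set.contains_iff u y).2 hy, if_true]
      rw [List.foldl_cons, hstep]
      obtain ⟨h1, h2⟩ := ih u (PySem.Set.add d y) hu (PySem.Set.nodup_add d y hd)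
        (by intro x hx; rcases (PySem.Set.mem_add d y x).1 hx with h | h
            · exact hsub x h
            · exact h ▸ hy)
      refine ⟨h1, fun x => ?_⟩
      rw [h2 x, PySem.Set.mem_add d y x]
      by_cases hxy : x = y
      · subst hxy
        simp [hy]
      · rw [List.count_cons_of_ne (Ne.symm hxy)]
        simp only [List.mem_cons, hxy, false_or, or_false]
    · have hc : PySem.Set.contains u y = false := by
        rcases h : PySem.Set.contains u y with _ | _
        · rfl
        · exact absurd ((PySem.Set.contains_iff u y).1 h) hy
      have hstep : pvStepA (u, d) y = (PySem.Set.add u y, d) := by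
        simp only [pvStepA, hc, Bool.false_eq_true, if_false]
      rw [List.foldl_cons, hstep]
      obtain ⟨h1, h2⟩ := ih (PySem.Set.add u y) d (PySem.Set.nodup_add u y hu) hd
        (fun x hx => (PySem.Set.mem_add u y x).2 (Or.inl (hsub x hx)))
      refine ⟨h1, fun x => ?_⟩
      rw [h2 x]
      by_cases hxy : x = y
      · subst hxy
        have hmem : x ∈ PySem.Set.add u x := (PySem.Set.mem_add u x x).2 (Or.inr rfl)
        rw [List.count_cons_self]
        constructor
        · rintro (h | ⟨_, h⟩ | h)
          · exact absurd (hsub x h) hy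
          · exact Or.inr (Or.inr (by have := List.count_pos_iff.mpr h; omega))
          · exact Or.inr (Or.inr (by omega))
        · rintro (h | ⟨h, _⟩ | h)
          · exact absurd (hsub x h) hy
          · exact absurd h hy
          · have hpos : 0 < List.count x ys := by omega
            exact Or.inr (Or.inl ⟨hmem, List.count_pos_iff.mp hpos⟩)
      · rw [List.count_cons_of_ne (Ne.symm hxy), PySem.Set.mem_add u y x]
        simp only [List.mem_cons, hxy, false_or, or_false]

-- B's inner fold: collects into a set the first components of adjacent equal pairs
lemma foldB_inv (L : List (Int × Int)) : ∀ (s : List Int), s.Nodup →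
    (L.foldl (fun (s : PySem.Set Int) p => if p.1 == p.2 then PySem.Set.add s p.1 else s) s).Nodup ∧
    (∀ x, x ∈ L.foldl (fun (s : PySem.Set Int) p => if p.1 == p.2 then PySem.Set.add s p.1 else s) s ↔
      x ∈ s ∨ (x, x) ∈ L) := by
  induction L with
  | nil => intro s hs; simp [hs]
  | cons p t ih =>
    intro s hs
    rcases p with ⟨a, b⟩
    by_cases hab : a = b
    · subst hab
      simp only [List.foldl_cons, BEq.rfl, if_true]
      obtain ⟨h1, h2⟩ := ih (PySem.Set.add s a) (PySem.Set.nodup_add s a hs)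
      refine ⟨h1, fun x => ?_⟩
      rw [h2 x, PySem.Set.mem_add s a x]
      constructor
      · rintro ((h | h) | h)
        · exact Or.inl h
        · subst h; exact Or.inr (List.mem_cons_self ..)
        · exact Or.inr (List.mem_cons_of_mem _ h)
      · rintro (h | h)
        · exact Or.inl (Or.inl h)
        · rcases List.mem_cons.1 h with h | h
          · exact Or.inl (Or.inr (congrArg Prod.fst h))
          · exact Or.inr h
    · have hne : ((a, b).1 == (a, b).2) = false := by simpa using hab
      simp only [List.foldl_cons, hne, Bool.false_eq_true, if_false]
      obtain ⟨h1, h2⟩ := ih s hs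
      refine ⟨h1, fun x => ?_⟩
      rw [h2 x]
      constructor
      · rintro (h | h)
        · exact Or.inl h
        · exact Or.inr (List.mem_cons_of_mem _ h)
      · rintro (h | h)
        · exact Or.inl h
        · rcases List.mem_cons.1 h with h | h
          · exact absurd ((congrArg Prod.fst h).symm.trans (congrArg Prod.snd h)) hab
          · exact Or.inr h

-- in a sorted list, a value has an adjacent equal pair iff it occurs at least twice
lemma adj_iff_count (ys : List Int) (hst : ys.Pairwise (fun a b => a ≤ b)) (v : Int) :
    (v, v) ∈ ys.zip ys.tail ↔ 2 ≤ ys.count v := by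
  induction ys with
  | nil => simp
  | cons a t ih =>
    have hta : ∀ x ∈ t, a ≤ x := fun x hx => (List.pairwise_cons.1 hst).1 x hx
    have htp : t.Pairwise (fun a b => a ≤ b) := (List.pairwise_cons.1 hst).2
    cases t with
    | nil =>
      constructor
      · intro h; simp at h
      · intro h
        exfalso
        have hle : List.count v [a] ≤ 1 := by
          by_cases hav : a = v <;> simp [hav]
        omega
    | cons c t' =>
      have hzip : (a :: c :: t').zip (a :: c :: t').tail
          = (a, c) :: ((c :: t').zip (c :: t').tail) := rfl
      rw [hzip, List.mem_cons, ih htp]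
      constructor
      · rintro (h | h)
        · injection h with h1 h2
          subst h1; subst h2
          simp
        · have hmono : List.count v (c :: t') ≤ List.count v (a :: c :: t') :=
            List.count_le_count_cons
          omega
      · intro h
        by_cases hav : a = v
        · subst hav
          have hmem : a ∈ c :: t' := by
            rw [List.count_cons_self] at h
            exact List.count_pos_iff.1 (by omega)
          have hca : c = a := by
            rcases List.mem_cons.1 hmem with h' | h'
            · exact h'.symm
            · have h1 : a ≤ c := hta c (List.mem_cons_self ..)
              have h2 : c ≤ a := (List.pairwise_cons.1 htp).1 a h'
              omega
          exact Or.inl (by rw [hca])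
        · rw [List.count_cons_of_ne hav] at h
          exact Or.inr h

-- per column, B's sorted adjacent-pair set has the same size as A's duplicate set
lemma perCol_eq (xs : List Int) :
    PySem.Set.len (((PySem.List.sorted xs (fun x => x) false).zip
        (PySem.List.slice (PySem.List.sorted xs (fun x => x) false) (some 1) none)).foldl
        (fun (s : PySem.Set Int) p => if p.1 == p.2 then PySem.Set.add s p.1 else s)
        PySem.Set.empty) =
    PySem.Set.len (List.foldl pvStepA (PySem.Set.empty, PySem.Set.empty) xs).2 := by
  rw [PySem.List.slice_from_one]
  obtain ⟨hndB, hmemB⟩ := foldB_inv ((PySem.List.sorted xs (fun x => x) false).zip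
    (PySem.List.sorted xs (fun x => x) false).tail) PySem.Set.empty List.nodup_nil
  obtain ⟨hndA, hmemA⟩ := foldA_inv xs PySem.Set.empty PySem.Set.empty
    List.nodup_nil List.nodup_nil (by simp [PySem.Set.empty])
  have hsorted : (PySem.List.sorted xs (fun x => x) false).Pairwise (fun a b => a ≤ b) := by
    simpa using PySem.List.sorted_pairwise (xs := xs) (key := fun x => x)
  have hperm : (((PySem.List.sorted xs (fun x => x) false).zip
      (PySem.List.sorted xs (fun x => x) false).tail).foldl
      (fun (s : PySem.Set Int) p => if p.1 == p.2 then PySem.Set.add s p.1 else s)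
      PySem.Set.empty).Perm (List.foldl pvStepA (PySem.Set.empty, PySem.Set.empty) xs).2 := by
    rw [List.perm_ext_iff_of_nodup hndB hndA]
    intro v
    rw [hmemB v, hmemA v, adj_iff_count _ hsorted v,
      (PySem.List.sorted_perm xs (fun x => x) false).count_eq v]
    constructor
    · rintro (h | h)
      · simp [PySem.Set.empty] at h
      · exact Or.inr (Or.inr h)
    · rintro (h | ⟨h, _⟩ | h)
      · simp [PySem.Set.empty] at h
      · simp [PySem.Set.empty] at h
      · exact Or.inr h
  simp only [PySem.Set.len]
  exact_mod_cast hperm.length_eq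

-- ===== VERDICT (by name: the statement is the Claim_ definition above) =====
theorem checkColumnDuplicates_spec : Claim_equal_checkColumnDuplicates := by
  intro matrix _ _
  unfold Spec_checkColumnDuplicates checkColumnDuplicates checkColumnDuplicates_alt
  congr 1
  funext acc col
  have hA : (List.foldl (fun (st : PySem.Set Int × PySem.Set Int) row =>
      let num := PySem.List.pyGetD row col 0
      if PySem.Set.contains st.1 num then (st.1, PySem.Set.add st.2 num)
      else (PySem.Set.add st.1 num, st.2)) (PySem.Set.empty, PySem.Set.empty) matrix)
      = List.foldl pvStepA (PySem.Set.empty, PySem.Set.empty)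
          (matrix.map (fun row => PySem.List.pyGetD row col 0)) := by
    rw [List.foldl_map]
    rfl
  show acc + _ = acc + _
  rw [hA, ← perCol_eq (matrix.map (fun row => PySem.List.pyGetD row col 0))]
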